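-- pv_equiv track=rewrite | github.com/not-lucky/notes_compact | test_jump_game.py | can_reach_vii
-- ===== SOURCE A (Python) =====
-- from collections import defaultdict, deque
--
-- def can_reach_vii(s: str, minJump: int, maxJump: int) -> bool:
--     if s[-1] == '1': return False
--     n = len(s)
--     q = deque([0])
--     farthest_checked = 0
--     while q:
--         i = q.popleft()
--         start = max(i + minJump, farthest_checked + 1)
--         end = min(i + maxJump, n - 1)
--         for j in range(start, end + 1):
--             if s[j] == '0':
--                 if j == n - 1:
--                     return True
--                 q.append(j)
--         farthest_checked = max(farthest_checked, i + maxJump)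
--     return False
-- ===== SOURCE B (Python) =====
-- def can_reach_vii(s: str, minJump: int, maxJump: int) -> bool:
--     if s[-1] == '1':
--         return False
--     n = len(s)
--     dp = [True]
--     for i in range(1, n):
--         lo = max(i - maxJump, 0)
--         hi = min(i - minJump, i - 1)
--         dp.append(s[i] == '0' and any(dp[k] for k in range(lo, hi + 1)))
--     return dp[n - 1]
-- ===== Notes on version B (the rewrite author's own statement) =====
-- stated objective: alternative
-- what changed: Replaces A's BFS over a deque with a farthest_checked pointer by a left-to-right DP table where dp[i] is true iff s[i]=='0' and some dp[k] in the jump window [i-maxJump, min(i-minJump, i-1)] is true, returning dp[n-1].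
-- outside the precondition, e.g. on can_reach_vii('', 1, 1): A raises IndexError, B raises IndexError; on can_reach_vii('0', 1, 1): A returns False, B returns True
import Mathlib
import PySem

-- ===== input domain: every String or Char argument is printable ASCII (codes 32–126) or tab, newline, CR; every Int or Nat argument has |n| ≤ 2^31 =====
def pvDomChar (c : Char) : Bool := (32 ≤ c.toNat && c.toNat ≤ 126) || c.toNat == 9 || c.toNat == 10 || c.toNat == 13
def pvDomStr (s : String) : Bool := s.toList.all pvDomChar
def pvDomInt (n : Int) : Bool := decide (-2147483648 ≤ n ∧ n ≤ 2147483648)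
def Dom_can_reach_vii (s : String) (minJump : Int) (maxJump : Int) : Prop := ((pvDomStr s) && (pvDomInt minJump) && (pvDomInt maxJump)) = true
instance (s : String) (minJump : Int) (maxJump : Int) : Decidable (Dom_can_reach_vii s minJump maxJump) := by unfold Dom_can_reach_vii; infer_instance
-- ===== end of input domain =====

-- B replaces A's BFS (deque + farthest_checked pointer) with a left-to-right DP table
-- (dp[i] = s[i]=='0' and some dp[k] in the jump window); same return value, no speed claim.

-- ===== PORT A =====
-- inner `for j in range(start, end+1)` loop of A: appends '0'-positions to the queue;
-- `none` encodes Python's early `return True` (j == n-1 with s[j] == '0').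
def innerA (cs : List Char) (m : Int) : List Int → List Int → Option (List Int)
  | [], acc => some acc
  | j :: rest, acc =>
    -- s[j]: whenever this code runs from the entry point, 1 ≤ j ≤ n-1, so the default is never used
    if PySem.List.pyGetD cs j ' ' = '0' then
      if j = m then none
      else innerA cs m rest (acc ++ [j])
    else innerA cs m rest acc

-- the `while q:` loop of A; state = (queue, farthest_checked).  The Nat argument is plain
-- fuel making the recursion structural; the caller passes len(s)+1, which bounds the number of
-- pops (loopA_spec_aux below is proved for every sufficient fuel), so it is only a totality guard.
def loopA (cs : List Char) (n mj Mj : Int) : Nat → List Int → Int → Bool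
  | 0, _, _ => false
  | N + 1, q, fc =>
    match q with
    | [] => false
    | i :: rest =>
      match innerA cs (n - 1)
          (PySem.List.pyRange (max (i + mj) (fc + 1)) (min (i + Mj) (n - 1) + 1) 1) rest with
      | none => true
      | some q' => loopA cs n mj Mj N q' (max fc (i + Mj))

def can_reach_vii (s : String) (minJump : Int) (maxJump : Int) : Bool :=
  match PySem.Str.pyGet? s (-1) with
  | none => false      -- Python raises IndexError here (empty string); excluded by Pre_
  | some c =>
    if c = '1' then false
    else loopA s.toList (s.toList.length : Int) minJump maxJump (s.toList.length + 1) [0] 0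

-- ===== PORT B =====
-- loop body of B: dp.append(s[i] == '0' and any(dp[k] for k in range(lo, hi+1)))
def stepB (cs : List Char) (mj Mj : Int) (dp : List Bool) (i : Int) : List Bool :=
  dp ++ [decide (PySem.List.pyGetD cs i ' ' = '0') &&
    ((PySem.List.pyRange (max (i - Mj) 0) (min (i - mj) (i - 1) + 1) 1).any
      fun k => PySem.List.pyGetD dp k false)]

def can_reach_vii_alt (s : String) (minJump : Int) (maxJump : Int) : Bool :=
  match PySem.Str.pyGet? s (-1) with
  | none => false      -- Python raises IndexError here (empty string); excluded by Pre_
  | some c =>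
    if c = '1' then false
    else
      PySem.List.pyGetD
        ((PySem.List.pyRange 1 (s.toList.length : Int) 1).foldl (stepB s.toList minJump maxJump) [true])
        ((s.toList.length : Int) - 1) false

-- ===== PRECONDITION & SPEC =====
-- Pre_ excludes the empty string, on which A raises IndexError, and length-1 strings ending in a
-- non-'1' character, a degenerate corner below the problem's stated domain (length ≥ 2) on which
-- A's False (index 0 is never scanned) and B's True (the start already is the last index) are both defensible.
def Pre_can_reach_vii (s : String) (minJump : Int) (maxJump : Int) : Prop :=
  2 ≤ s.toList.length ∨ s.toList.getLast? = some '1'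
instance (s : String) (minJump : Int) (maxJump : Int) : Decidable (Pre_can_reach_vii s minJump maxJump) := by
  unfold Pre_can_reach_vii; infer_instance
def pvWitness_can_reach_vii : String × Int × Int := ("0100", 2, 3)

def Spec_can_reach_vii (s : String) (minJump : Int) (maxJump : Int) (out : Bool) : Prop := out = can_reach_vii_alt s minJump maxJump
instance (s : String) (minJump : Int) (maxJump : Int) (out : Bool) : Decidable (Spec_can_reach_vii s minJump maxJump out) := by unfold Spec_can_reach_vii; infer_instance

-- ===== CLAIM (what is proved, stated in full; the proofs are below) =====
def Claim_equal_can_reach_vii : Prop := ∀ (s : String) (minJump : Int) (maxJump : Int), Dom_can_reach_vii s minJump maxJump → Pre_can_reach_vii s minJump maxJump → Spec_can_reach_vii s minJump maxJump (can_reach_vii s minJump maxJump)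

-- ===== LEMMAS AND PROOFS =====

-- closed form of A's inner scan
theorem innerA_eq (cs : List Char) (m : Int) (js : List Int) : ∀ acc : List Int,
    innerA cs m js acc =
      if js.any (fun j => decide (PySem.List.pyGetD cs j ' ' = '0') && decide (j = m)) then none
      else some (acc ++ js.filter (fun j => decide (PySem.List.pyGetD cs j ' ' = '0'))) := by
  induction js with
  | nil => intro acc; simp [innerA]
  | cons j rest ih =>
    intro acc
    simp only [innerA, List.any_cons, List.filter_cons]
    by_cases h0 : PySem.List.pyGetD cs j ' ' = '0'
    · by_cases hm : j = m
      · subst hm; simp [h0]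
      · simp [h0, hm, ih]
    · simp [h0, ih]

-- specification both ports are reduced to: index t is reachable from 0 by jumps k → t
-- with k < t, k+minJump ≤ t ≤ k+maxJump, landing only on '0' characters
def reach (cs : List Char) (mj Mj : Int) : Nat → Bool
  | 0 => true
  | (j+1) =>
    decide (cs.getD (j+1) ' ' = '0') &&
    ((List.range (j+1)).attach.any fun k =>
      reach cs mj Mj k.1 && decide ((k.1 : Int) + mj ≤ (j:Int)+1 ∧ (j:Int)+1 ≤ (k.1 : Int) + Mj))
decreasing_by
  have := List.mem_range.mp k.2; omega

theorem reach_zero (cs : List Char) (mj Mj : Int) : reach cs mj Mj 0 = true := by simp [reach]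

theorem reach_pos (cs : List Char) (mj Mj : Int) (t : Nat) (ht : 1 ≤ t) :
    reach cs mj Mj t = true ↔
      (cs.getD t ' ' = '0' ∧
       ∃ k : Nat, k < t ∧ reach cs mj Mj k = true ∧ (k:Int) + mj ≤ (t:Int) ∧ (t:Int) ≤ (k:Int) + Mj) := by
  obtain ⟨j, rfl⟩ : ∃ j, t = j + 1 := ⟨t - 1, by omega⟩
  rw [show reach cs mj Mj (j+1) =
    (decide (cs.getD (j+1) ' ' = '0') &&
    ((List.range (j+1)).attach.any fun k =>
      reach cs mj Mj k.1 && decide ((k.1 : Int) + mj ≤ (j:Int)+1 ∧ (j:Int)+1 ≤ (k.1 : Int) + Mj))) from by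
      simp [reach]]
  simp only [Bool.and_eq_true, decide_eq_true_eq, List.any_eq_true, List.mem_attach, true_and,
    Subtype.exists, List.mem_range]
  constructor
  · rintro ⟨h0, k, hk, hrk, hw⟩
    exact ⟨h0, k, hk, hrk, by push_cast; omega, by push_cast; omega⟩
  · rintro ⟨h0, k, hk, hrk, hw1, hw2⟩
    exact ⟨h0, k, hk, hrk, by push_cast at hw1 hw2 ⊢; omega⟩

-- ## B-side: the fold computes exactly the table of `reach` values
theorem foldB_eq (cs : List Char) (mj Mj : Int) :
    ∀ (m : Int), 1 ≤ m →
      (PySem.List.pyRange 1 m 1).foldl (stepB cs mj Mj) [true] =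
        (List.range m.toNat).map (reach cs mj Mj) := by
  intro m hm
  induction m, hm using Int.le_induction with
  | base =>
    simp [PySem.List.pyRange_one_eq_nil (le_refl (1:Int)), List.range_succ, reach_zero]
  | succ m hm ih =>
    rw [PySem.List.pyRange_one_succ_right (by omega), List.foldl_append, ih]
    have ht : (m + 1).toNat = m.toNat + 1 := by omega
    rw [ht, List.range_succ, List.map_append]
    unfold stepB
    simp only [List.foldl_cons, List.foldl_nil, List.map_cons, List.map_nil]
    congr 1
    congr 1
    have htm : 1 ≤ m.toNat := by omega
    rw [Bool.eq_iff_iff, reach_pos cs mj Mj m.toNat htm]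
    simp only [Bool.and_eq_true, decide_eq_true_eq, List.any_eq_true, PySem.List.mem_pyRange_one]
    have hcs : PySem.List.pyGetD cs m ' ' = cs.getD m.toNat ' ' := by
      rw [PySem.List.pyGetD_of_nonneg _ _ (by omega)]
    constructor
    · rintro ⟨h0, k, ⟨hk1, hk2⟩, hdp⟩
      have hA : m - Mj ≤ k := le_trans (le_max_left _ _) hk1
      have hA0 : (0:Int) ≤ k := le_trans (le_max_right _ _) hk1
      have hmin1 : min (m - mj) (m - 1) ≤ m - mj := min_le_left _ _
      have hmin2 : min (m - mj) (m - 1) ≤ m - 1 := min_le_right _ _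
      rw [PySem.List.pyGetD_of_nonneg _ _ hA0,
        PySem.List.getD_map_range _ _ _ _ (by omega)] at hdp
      exact ⟨hcs ▸ h0, k.toNat, by omega, hdp, by omega, by omega⟩
    · rintro ⟨h0, k, hk, hrk, hw1, hw2⟩
      refine ⟨hcs ▸ h0, (k:Int), ⟨max_le (by omega) (by omega), ?_⟩, ?_⟩
      · have : (k:Int) ≤ min (m - mj) (m - 1) := le_min (by omega) (by omega)
        omega
      · rw [PySem.List.pyGetD_natCast, PySem.List.getD_map_range _ _ _ _ (by omega)]
        exact hrk

-- ## A-side: the BFS loop decides `reach` at the last index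
-- empty-queue case: under the invariant nothing past `p` is reachable at all
theorem loopA_nil_spec (cs : List Char) (mj Mj n fc p : Int)
    (h2 : 2 ≤ n) (hp : -1 ≤ p) (hpf : p ≤ fc) (hfc : 0 ≤ fc)
    (hq : ∀ j : Int, j ∈ ([] : List Int) ↔ (p < j ∧ j ≤ fc ∧ j ≤ n - 1 ∧ reach cs mj Mj j.toNat = true))
    (h4 : ∀ k : Int, 0 ≤ k → k ≤ p → reach cs mj Mj k.toNat = true → k + Mj ≤ fc)
    (h5 : reach cs mj Mj (n-1).toNat = true → fc < n - 1) :
    reach cs mj Mj (n-1).toNat = false := by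
  have key : ∀ t : Nat, (t:Int) ≤ n - 1 → reach cs mj Mj t = true → (t:Int) ≤ p := by
    intro t
    induction t using Nat.strong_induction_on with
    | _ t ih =>
      match t with
      | 0 =>
        intro _ h0
        by_contra hpt
        have := (hq 0).mpr ⟨by omega, by omega, by omega, by simpa using h0⟩
        simp at this
      | (j+1) =>
        intro hle hr
        obtain ⟨h0, k, hk, hrk, hw1, hw2⟩ := (reach_pos cs mj Mj (j+1) (by omega)).mp hr
        have hkp : (k:Int) ≤ p := ih k hk (by omega) hrk
        have hfcb : ((j:Int)+1) ≤ fc := by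
          have := h4 (k:Int) (by omega) hkp (by simpa using hrk)
          push_cast at hw2
          omega
        by_contra hpt
        have := (hq ((j:Int)+1)).mpr ⟨by omega, hfcb, by push_cast at hle ⊢; omega,
          by rw [show (((j:Int)+1)).toNat = j + 1 by omega]; exact hr⟩
        simp at this
  by_contra hne
  rw [Bool.not_eq_false] at hne
  have h5' := h5 hne
  have := key (n-1).toNat (by omega) hne
  omega

-- main invariant lemma, by induction on the loop measure
theorem loopA_spec_aux (cs : List Char) (mj Mj n : Int) (h2 : 2 ≤ n) (N : Nat) :
    ∀ (q : List Int) (fc p : Int), q.length + (n - 1 - fc).toNat ≤ N →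
    (-1 ≤ p) → (p ≤ fc) → (0 ≤ fc) →
    (∀ j : Int, j ∈ q ↔ (p < j ∧ j ≤ fc ∧ j ≤ n - 1 ∧ reach cs mj Mj j.toNat = true)) →
    q.Pairwise (· < ·) →
    (∀ k : Int, 0 ≤ k → k ≤ p → reach cs mj Mj k.toNat = true → k + Mj ≤ fc) →
    (reach cs mj Mj (n-1).toNat = true → fc < n - 1) →
    loopA cs n mj Mj N q fc = reach cs mj Mj (n-1).toNat := by
  induction N with
  | zero =>
    intro q fc p hN hp hpf hfc hq hsort h4 h5
    have hqnil : q = [] := by cases q with | nil => rfl | cons a l => simp at hN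
    subst hqnil
    rw [show loopA cs n mj Mj 0 [] fc = false from rfl,
      loopA_nil_spec cs mj Mj n fc p h2 hp hpf hfc hq h4 h5]
  | succ N ih =>
    intro q fc p hN hp hpf hfc hq hsort h4 h5
    match q with
    | [] =>
      rw [show loopA cs n mj Mj (N + 1) [] fc = false from rfl,
        loopA_nil_spec cs mj Mj n fc p h2 hp hpf hfc hq h4 h5]
    | i :: rest =>
      obtain ⟨hpi, hifc, hin, hri⟩ := (hq i).mp (by simp)
      have hi0 : (0:Int) ≤ i := by omega
      -- characterisation of the scanned range
      have c1 : ∀ j : Int, max (i + mj) (fc + 1) ≤ j → j ≤ min (i + Mj) (n - 1) →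
          (PySem.List.pyGetD cs j ' ' = '0' ↔ reach cs mj Mj j.toNat = true) := by
        intro j hjS hjE
        have hj1 : fc + 1 ≤ j := le_trans (le_max_right _ _) hjS
        have hj2 : i + mj ≤ j := le_trans (le_max_left _ _) hjS
        have hj3 : j ≤ i + Mj := le_trans hjE (min_le_left _ _)
        have hj4 : j ≤ n - 1 := le_trans hjE (min_le_right _ _)
        rw [PySem.List.pyGetD_of_nonneg _ _ (by omega : (0:Int) ≤ j),
          reach_pos cs mj Mj j.toNat (by omega)]
        constructor
        · intro h0
          exact ⟨h0, i.toNat, by omega, hri, by omega, by omega⟩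
        · rintro ⟨h0, -⟩; exact h0
      have c2 : ∀ j : Int, fc < j → j < max (i + mj) (fc + 1) → j ≤ n - 1 →
          reach cs mj Mj j.toNat = false := by
        intro j hj1 hj2 hj3
        by_contra hne
        rw [Bool.not_eq_false] at hne
        have hjlt : j < i + mj := by
          rcases lt_max_iff.mp hj2 with h | h
          · exact h
          · omega
        obtain ⟨h0, k, hk, hrk, hw1, hw2⟩ := (reach_pos cs mj Mj j.toNat (by omega)).mp hne
        have hjk : (j.toNat : Int) = j := by omega
        rw [hjk] at hw1 hw2
        have hki : (k:Int) < i := by omega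
        by_cases hkp : (k:Int) ≤ p
        · have := h4 (k:Int) (by omega) hkp (by simpa using hrk)
          omega
        · have hkq : (k:Int) ∈ i :: rest := (hq _).mpr ⟨by omega, by omega, by omega, by simpa using hrk⟩
          rcases List.mem_cons.mp hkq with he | hm
          · omega
          · have := (List.pairwise_cons.mp hsort).1 _ hm; omega
      rw [loopA]
      split
      next h =>
        -- early return True: the scan hit j = n-1 with s[j] = '0'
        rw [innerA_eq] at h
        split at h
        next hcond =>
          simp only [List.any_eq_true, Bool.and_eq_true, decide_eq_true_eq,
            PySem.List.mem_pyRange_one] at hcond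
          obtain ⟨j, ⟨hjS, hjE⟩, h0, rfl⟩ := hcond
          exact ((c1 _ hjS (by omega)).mp h0).symm
        next => simp at h
      next q' h =>
        rw [innerA_eq] at h
        split at h
        next => simp at h
        next hcond =>
          have hq'' : q' = rest ++ (PySem.List.pyRange (max (i + mj) (fc + 1)) (min (i + Mj) (n - 1) + 1) 1).filter
              (fun j => decide (PySem.List.pyGetD cs j ' ' = '0')) :=
            ((Option.some.injEq _ _).mp h).symm
          subst hq''
          set F := (PySem.List.pyRange (max (i + mj) (fc + 1)) (min (i + Mj) (n - 1) + 1) 1).filter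
              (fun j => decide (PySem.List.pyGetD cs j ' ' = '0')) with hF
          -- no early return: n-1 was not scanned as a '0'
          have hEarly : ¬ (max (i + mj) (fc + 1) ≤ n - 1 ∧ n - 1 ≤ min (i + Mj) (n - 1) ∧
              PySem.List.pyGetD cs (n-1) ' ' = '0') := by
            intro ⟨hA, hB, hC⟩
            exact hcond (List.any_eq_true.mpr ⟨n - 1,
              PySem.List.mem_pyRange_one.mpr ⟨hA, by omega⟩, by simp [hC]⟩)
          -- measure decreases
          have hlen : (rest ++ F).length ≤ rest.length +
              (min (i + Mj) (n - 1) + 1 - max (i + mj) (fc + 1)).toNat := by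
            rw [List.length_append, hF]
            have := List.length_filter_le (fun j => decide (PySem.List.pyGetD cs j ' ' = '0'))
              (PySem.List.pyRange (max (i + mj) (fc + 1)) (min (i + Mj) (n - 1) + 1) 1)
            have hr := PySem.List.length_pyRange_one (max (i + mj) (fc + 1)) (min (i + Mj) (n - 1) + 1)
            omega
          have hx1 : fc + 1 ≤ max (i + mj) (fc + 1) := le_max_right _ _
          have hx2 : min (i + Mj) (n - 1) ≤ i + Mj := min_le_left _ _
          have hx3 : min (i + Mj) (n - 1) ≤ n - 1 := min_le_right _ _
          have hx4 : fc ≤ max fc (i + Mj) := le_max_left _ _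
          have hx5 : i + Mj ≤ max fc (i + Mj) := le_max_right _ _
          apply ih _ _ i
          · simp only [List.length_cons] at hN; omega
          · omega
          · omega
          · omega
          · -- queue invariant for the new state
            intro j
            simp only [hF, List.mem_append, List.mem_filter, PySem.List.mem_pyRange_one,
              decide_eq_true_eq]
            constructor
            · rintro (hm | ⟨⟨hjS, hjE⟩, h0⟩)
              · obtain ⟨-, hjfc, hjn, hjr⟩ := (hq j).mp (List.mem_cons_of_mem _ hm)
                have := (List.pairwise_cons.mp hsort).1 _ hm
                exact ⟨this, by omega, hjn, hjr⟩
              · refine ⟨by omega, by omega, by omega, (c1 _ hjS (by omega)).mp h0⟩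
            · rintro ⟨hij, hjf, hjn, hjr⟩
              by_cases hjfc : j ≤ fc
              · left
                have := (hq j).mpr ⟨by omega, hjfc, hjn, hjr⟩
                rcases List.mem_cons.mp this with he | hm
                · omega
                · exact hm
              · right
                have hjE : j ≤ min (i + Mj) (n - 1) := le_min (by omega) hjn
                by_cases hjS : max (i + mj) (fc + 1) ≤ j
                · exact ⟨⟨hjS, by omega⟩, (c1 _ hjS hjE).mpr hjr⟩
                · have := c2 j (by omega) (by omega) hjn
                  rw [hjr] at this; exact absurd this (by simp)
          · -- sortedness of the new queue
            rw [hF]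
            refine List.pairwise_append.mpr ⟨(List.pairwise_cons.mp hsort).2, ?_, ?_⟩
            · exact List.Pairwise.sublist List.filter_sublist (PySem.List.pairwise_lt_pyRange_one _ _)
            · intro a ha b hb
              obtain ⟨-, hafc, -, -⟩ := (hq a).mp (List.mem_cons_of_mem _ ha)
              have hbS := (List.mem_filter.mp hb).1
              have := (PySem.List.mem_pyRange_one.mp hbS).1
              omega
          · -- all popped positions have their windows inside the new farthest_checked
            intro k hk0 hki hkr
            by_cases hkp : k ≤ p
            · have := h4 k hk0 hkp hkr; omega
            · by_cases hke : k = i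
              · omega
              · have := (hq k).mpr ⟨by omega, by omega, by omega, hkr⟩
                rcases List.mem_cons.mp this with he | hm
                · omega
                · have := (List.pairwise_cons.mp hsort).1 _ hm; omega
          · -- if the last index is reachable it is still unchecked
            intro hr
            by_contra hge
            have hge : n - 1 ≤ max fc (i + Mj) := by omega
            have h5fc := h5 hr
            have hnM : n - 1 ≤ i + Mj := by
              rcases le_max_iff.mp hge with hle | hle
              · omega
              · exact hle
            obtain ⟨h0, -⟩ := (reach_pos cs mj Mj (n-1).toNat (by omega)).mp hr
            have h0' : PySem.List.pyGetD cs (n-1) ' ' = '0' := by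
              rw [PySem.List.pyGetD_of_nonneg _ _ (by omega : (0:Int) ≤ n - 1)]
              exact h0
            have hS : n - 1 < max (i + mj) (fc + 1) := by
              by_contra hSle
              exact hEarly ⟨by omega, le_min hnM le_rfl, h0'⟩
            have := c2 (n-1) (by omega) hS le_rfl
            rw [hr] at this; exact absurd this (by simp)

-- ===== VERDICT (by name: the statement is the Claim_ definition above) =====
theorem can_reach_vii_spec : Claim_equal_can_reach_vii := by
  intro s mj Mj hdom hpre
  unfold Spec_can_reach_vii can_reach_vii can_reach_vii_alt
  have hneg : PySem.Str.pyGet? s (-1) = s.toList.getLast? := by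
    simp [PySem.Str.pyGet?, PySem.List.pyGet?_neg_one]
  rw [hneg]
  cases hL : s.toList.getLast? with
  | none => rfl
  | some c =>
    by_cases hc : c = '1'
    · simp [hc]
    · show (if c = '1' then false else loopA s.toList (s.toList.length : Int) mj Mj (s.toList.length + 1) [0] 0) =
        (if c = '1' then false else
          PySem.List.pyGetD
            ((PySem.List.pyRange 1 (s.toList.length : Int) 1).foldl (stepB s.toList mj Mj) [true])
            ((s.toList.length : Int) - 1) false)
      rw [if_neg hc, if_neg hc]
      have hlen : 2 ≤ s.toList.length := by
        rcases hpre with h | h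
        · exact h
        · rw [hL] at h; exact absurd (Option.some.injEq _ _ ▸ h) (by simpa using hc)
      have h2 : (2:Int) ≤ (s.toList.length : Int) := by exact_mod_cast hlen
      rw [foldB_eq s.toList mj Mj (s.toList.length : Int) (by omega)]
      rw [PySem.List.pyGetD_of_nonneg _ _ (by omega : (0:Int) ≤ (s.toList.length : Int) - 1),
        PySem.List.getD_map_range _ _ _ _ (by omega)]
      apply loopA_spec_aux s.toList mj Mj (s.toList.length : Int) h2
        (s.toList.length + 1) [0] 0 (-1) (by simp; omega)
      · omega
      · omega
      · omega
      · intro j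
        simp only [List.mem_singleton]
        constructor
        · rintro rfl
          exact ⟨by omega, by omega, by omega, by simpa using reach_zero s.toList mj Mj⟩
        · rintro ⟨hj1, hj2, -, -⟩; omega
      · simp
      · intro k hk0 hk1 _; omega
      · intro _; omega
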